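-- pv_equiv track=rewrite | github.com/1b0325h/ac-python | problems/abc/183/d.py | imos1
-- ===== SOURCE A (Python) =====
-- def imos1(start, end, add):
--     table = [0] * (max(end)+2)
--     for i in range(len(start)):
--         table[start[i]] += add[i]
--         table[end[i]] -= add[i]
--     for i in range(1, max(end)+2):
--         table[i] += table[i-1]
--     return table
-- ===== SOURCE B (Python) =====
-- def imos1(start, end, add):
--     table = [0] * (max(end) + 2)
--     for s, e, a in zip(start, end, add):
--         table[s:] = [x + a for x in table[s:]]
--         table[e:] = [x - a for x in table[e:]]
--     return table
-- ===== Notes on version B (the rewrite author's own statement) =====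
-- stated objective: alternative
-- what changed: Replaces the difference-array-plus-prefix-sum (imos) strategy with per-interval suffix updates written as slice assignments: each interval adds its value to the whole suffix table[s:] and subtracts it from the suffix table[e:], so the diff table and the prefix-accumulation pass disappear.
import Mathlib
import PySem

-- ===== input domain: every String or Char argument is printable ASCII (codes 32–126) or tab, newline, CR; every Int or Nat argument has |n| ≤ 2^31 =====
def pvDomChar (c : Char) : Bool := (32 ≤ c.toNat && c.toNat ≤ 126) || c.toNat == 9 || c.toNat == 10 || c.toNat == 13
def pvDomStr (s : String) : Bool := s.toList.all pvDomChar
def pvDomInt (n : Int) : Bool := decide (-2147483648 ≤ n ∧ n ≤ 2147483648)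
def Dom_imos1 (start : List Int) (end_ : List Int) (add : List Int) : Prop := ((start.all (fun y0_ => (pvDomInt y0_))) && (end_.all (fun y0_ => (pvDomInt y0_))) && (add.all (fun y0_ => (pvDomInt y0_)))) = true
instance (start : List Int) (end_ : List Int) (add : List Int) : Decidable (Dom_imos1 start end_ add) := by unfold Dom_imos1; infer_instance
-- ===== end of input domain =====

-- B replaces A's difference-array + prefix-sum (imos) strategy by per-interval suffix updates
-- written as slice assignments (add to table[s:], subtract from table[e:]); objective: alternative.

-- ===== PORT A =====
-- literal port of A: diff table, then in-place prefix accumulation.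
def imos1 (start : List Int) (end_ : List Int) (add : List Int) : List Int :=
  match PySem.List.max? end_ (fun x => x) with
  | none => []  -- max([]) raises ValueError; excluded by Pre_imos1
  | some m =>
    let table := PySem.List.pyRepeat [(0 : Int)] (m + 2)
    let table := (List.range start.length).foldl (fun (t : List Int) (i : Nat) =>
      let t1 := PySem.List.pySetD t (PySem.List.pyGetD start (i : Int) 0)
        (PySem.List.pyGetD t (PySem.List.pyGetD start (i : Int) 0) 0 + PySem.List.pyGetD add (i : Int) 0)
      PySem.List.pySetD t1 (PySem.List.pyGetD end_ (i : Int) 0)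
        (PySem.List.pyGetD t1 (PySem.List.pyGetD end_ (i : Int) 0) 0 - PySem.List.pyGetD add (i : Int) 0)) table
    (PySem.List.pyRange 1 (m + 2) 1).foldl (fun t i =>
      PySem.List.pySetD t i (PySem.List.pyGetD t i 0 + PySem.List.pyGetD t (i - 1) 0)) table

-- ===== PORT B =====
-- literal port of B: for s, e, a in zip(start, end, add):
--   table[s:] = [x + a for x in table[s:]];  table[e:] = [x - a for x in table[e:]]
-- (a Python slice assignment 'table[s:] = L' is table = table[:s] + L, exactly as written here)
def imos1_alt (start : List Int) (end_ : List Int) (add : List Int) : List Int :=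
  match PySem.List.max? end_ (fun x => x) with
  | none => []  -- max([]) raises ValueError; excluded by Pre_imos1
  | some m =>
    let table := PySem.List.pyRepeat [(0 : Int)] (m + 2)
    (start.zip (end_.zip add)).foldl (fun t sea =>
      let t1 := PySem.List.slice t none (some sea.1) ++
        (PySem.List.slice t (some sea.1) none).map (fun x => x + sea.2.2)
      PySem.List.slice t1 none (some sea.2.1) ++
        (PySem.List.slice t1 (some sea.2.1) none).map (fun x => x - sea.2.2)) table

-- ===== PRECONDITION & SPEC =====
-- Pre_ excludes exactly the inputs on which A raises: empty end (ValueError from max), end/add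
-- shorter than start (IndexError), and any used start[i]/end[i] outside Python's legal index
-- range for the table of length max(end)+2 (IndexError).
def Pre_imos1 (start : List Int) (end_ : List Int) (add : List Int) : Prop :=
  end_ ≠ [] ∧ start.length ≤ end_.length ∧ start.length ≤ add.length ∧
  ∀ i < start.length,
    PySem.Raise.InRange (((PySem.List.max? end_ (fun x => x)).getD 0 + 2).toNat) (start.getD i 0) ∧
    PySem.Raise.InRange (((PySem.List.max? end_ (fun x => x)).getD 0 + 2).toNat) (end_.getD i 0)
instance (start : List Int) (end_ : List Int) (add : List Int) : Decidable (Pre_imos1 start end_ add) := by unfold Pre_imos1; infer_instance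

def pvWitness_imos1 : List Int × List Int × List Int := ([0, 2], [3, 4], [1, 2])

def Spec_imos1 (start : List Int) (end_ : List Int) (add : List Int) (out : List Int) : Prop := out = imos1_alt start end_ add
instance (start : List Int) (end_ : List Int) (add : List Int) (out : List Int) : Decidable (Spec_imos1 start end_ add out) := by unfold Spec_imos1; infer_instance

-- ===== CLAIM (what is proved, stated in full; the proofs are below) =====
def Claim_equal_imos1 : Prop := ∀ (start : List Int) (end_ : List Int) (add : List Int), Dom_imos1 start end_ add → Pre_imos1 start end_ add → Spec_imos1 start end_ add (imos1 start end_ add)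

-- ===== LEMMAS AND PROOFS =====

-- prefix sum of the first j+1 entries of t (0 outside)
def pvPsum (t : List Int) (j : Nat) : Int :=
  ((List.range (j + 1)).map (fun k => t.getD k 0)).sum

-- the normalised (wrapped) Python index, as a Nat
def pvIdx (n : Nat) (i : Int) : Nat := (PySem.List.pyIdx? n i).getD 0

theorem pv_getD_set_eq (t : List Int) (k : Nat) (v : Int) (hk : k < t.length) (i : Nat) :
    (t.set k v).getD i 0 = if i = k then v else t.getD i 0 := by
  rw [List.getD_eq_getElem?_getD, List.getElem?_set]
  by_cases h : i = k
  · subst h; simp [hk]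
  · rw [if_neg (by omega), if_neg h, List.getD_eq_getElem?_getD]

theorem pv_psum_succ (t : List Int) (j : Nat) :
    pvPsum t (j + 1) = pvPsum t j + t.getD (j + 1) 0 := by
  simp [pvPsum, List.range_succ]
  ring

theorem pv_psum_set (t : List Int) (k : Nat) (v : Int) (hk : k < t.length) (j : Nat) :
    pvPsum (t.set k (t.getD k 0 + v)) j = pvPsum t j + if k ≤ j then v else 0 := by
  induction j with
  | zero =>
    unfold pvPsum
    simp only [List.range_succ, List.range_zero, List.nil_append, List.map_cons, List.map_nil,
      List.sum_cons, List.sum_nil]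
    rw [pv_getD_set_eq t k _ hk]
    by_cases h : (0 : Nat) = k
    · rw [if_pos h, if_pos (by omega)]; subst h; ring
    · rw [if_neg h, if_neg (by omega)]; ring
  | succ j ih =>
    rw [pv_psum_succ, pv_psum_succ, ih, pv_getD_set_eq t k _ hk]
    by_cases h1 : j + 1 = k
    · subst h1; rw [if_pos rfl, if_neg (by omega), if_pos (by omega)]; ring
    · rw [if_neg h1]
      by_cases h2 : k ≤ j
      · rw [if_pos h2, if_pos (by omega)]; ring
      · rw [if_neg h2, if_neg (by omega)]; ring

-- ---- the wrapped index ----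

theorem pv_pyIdx_some_lt (n : Nat) (i : Int) (k : Nat) (h : PySem.List.pyIdx? n i = some k) :
    k < n := by
  unfold PySem.List.pyIdx? at h
  split_ifs at h with h1 h2 h3 <;> injection h with h' <;> omega

theorem pv_inRange_idx (n : Nat) (i : Int) (h : PySem.Raise.InRange n i) :
    PySem.List.pyIdx? n i = some (pvIdx n i) := by
  obtain ⟨h1, h2⟩ := h
  unfold pvIdx PySem.List.pyIdx?
  split_ifs <;> simp_all

-- the normalised index of a nonnegative / negative in-range Int
theorem pv_idx_nonneg (n : Nat) (i : Int) (h0 : 0 ≤ i) (h1 : i < n) :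
    pvIdx n i = i.toNat := by
  unfold pvIdx PySem.List.pyIdx?
  rw [if_pos h0, if_pos h1]
  rfl

theorem pv_idx_neg (n : Nat) (i : Int) (h0 : i < 0) (h1 : -(n : Int) ≤ i) :
    pvIdx n i = n - (-i).toNat := by
  unfold pvIdx PySem.List.pyIdx?
  rw [if_neg (by omega), if_pos h1]
  rfl

theorem pv_pySetD_idx {t : List Int} {i : Int} {k : Nat}
    (h : PySem.List.pyIdx? t.length i = some k) (v : Int) :
    PySem.List.pySetD t i v = t.set k v := by
  simp [PySem.List.pySetD, PySem.List.pySet?, h]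

theorem pv_pyGetD_idx {t : List Int} {i : Int} {k : Nat}
    (h : PySem.List.pyIdx? t.length i = some k) :
    PySem.List.pyGetD t i 0 = t.getD k 0 := by
  simp [PySem.List.pyGetD, PySem.List.pyGet?, h, List.getD_eq_getElem?_getD]

-- ---- A side ----

-- A's diff step on one triple
def pvStepA (t : List Int) (sea : Int × Int × Int) : List Int :=
  let t1 := PySem.List.pySetD t sea.1 (PySem.List.pyGetD t sea.1 0 + sea.2.2)
  PySem.List.pySetD t1 sea.2.1 (PySem.List.pyGetD t1 sea.2.1 0 - sea.2.2)

theorem pv_length_stepA (t : List Int) (sea : Int × Int × Int) :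
    (pvStepA t sea).length = t.length := by
  simp [pvStepA]

theorem pv_length_fillA (L : List (Int × Int × Int)) (t : List Int) :
    (L.foldl pvStepA t).length = t.length := by
  induction L generalizing t with
  | nil => rfl
  | cons sea L ih => simp [List.foldl_cons, ih, pv_length_stepA]

theorem pv_psum_stepA (t : List Int) (sea : Int × Int × Int)
    (h1 : PySem.Raise.InRange t.length sea.1) (h2 : PySem.Raise.InRange t.length sea.2.1) (j : Nat) :
    pvPsum (pvStepA t sea) j =
      pvPsum t j + ((if pvIdx t.length sea.1 ≤ j then sea.2.2 else 0)
                    - (if pvIdx t.length sea.2.1 ≤ j then sea.2.2 else 0)) := by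
  have hks := pv_inRange_idx _ _ h1
  have hke := pv_inRange_idx _ _ h2
  have hkslt := pv_pyIdx_some_lt _ _ _ hks
  have hkelt := pv_pyIdx_some_lt _ _ _ hke
  unfold pvStepA
  simp only
  rw [pv_pyGetD_idx hks, pv_pySetD_idx hks]
  set t1 := t.set (pvIdx t.length sea.1) (t.getD (pvIdx t.length sea.1) 0 + sea.2.2) with ht1
  have hlen1 : t1.length = t.length := by simp [ht1]
  have hke' : PySem.List.pyIdx? t1.length sea.2.1 = some (pvIdx t.length sea.2.1) := by
    rw [hlen1]; exact hke
  rw [pv_pyGetD_idx hke', pv_pySetD_idx hke', sub_eq_add_neg,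
      pv_psum_set t1 _ (-sea.2.2) (by rw [hlen1]; exact hkelt) j,
      pv_psum_set t _ sea.2.2 hkslt j]
  split_ifs <;> ring

theorem pv_psum_fillA (L : List (Int × Int × Int)) (t : List Int)
    (hL : ∀ sea ∈ L, PySem.Raise.InRange t.length sea.1 ∧ PySem.Raise.InRange t.length sea.2.1)
    (j : Nat) :
    pvPsum (L.foldl pvStepA t) j =
      pvPsum t j + (L.map (fun sea =>
        (if pvIdx t.length sea.1 ≤ j then sea.2.2 else 0)
        - (if pvIdx t.length sea.2.1 ≤ j then sea.2.2 else 0))).sum := by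
  induction L generalizing t with
  | nil => simp
  | cons sea L ih =>
    have hsea := hL sea (by simp)
    have htail : ∀ x ∈ L, PySem.Raise.InRange (pvStepA t sea).length x.1 ∧
        PySem.Raise.InRange (pvStepA t sea).length x.2.1 := by
      intro x hx
      have h := hL x (List.mem_cons_of_mem _ hx)
      rw [pv_length_stepA]
      exact h
    rw [List.foldl_cons, ih _ htail, pv_psum_stepA t sea hsea.1 hsea.2 j]
    simp only [List.map_cons, List.sum_cons, pv_length_stepA]
    ring

-- ---- prefix-accumulation loop ----

theorem pv_length_prefix (t0 : List Int) (r : Nat) :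
    ((List.range r).foldl (fun t k => t.set (1 + k) (t.getD (1 + k) 0 + t.getD k 0)) t0).length
      = t0.length := by
  induction r with
  | zero => rfl
  | succ r ih =>
    rw [List.range_succ, List.foldl_append, List.foldl_cons, List.foldl_nil,
        List.length_set, ih]

theorem pv_prefix_getD (t0 : List Int) (r : Nat) :
    (∀ k < r, 1 + k < t0.length) → ∀ j : Nat,
    ((List.range r).foldl (fun t k => t.set (1 + k) (t.getD (1 + k) 0 + t.getD k 0)) t0).getD j 0
      = if j ≤ r then pvPsum t0 j else t0.getD j 0 := by
  induction r with
  | zero =>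
    intro _ j
    simp only [List.range_zero, List.foldl_nil]
    by_cases h : j = 0
    · subst h; rw [if_pos (le_refl 0)]; simp [pvPsum]
    · rw [if_neg (by omega)]
  | succ r ih =>
    intro hr j
    have hr' : ∀ k < r, 1 + k < t0.length := fun k hk => hr k (by omega)
    have hlen : ((List.range r).foldl (fun t k => t.set (1 + k) (t.getD (1 + k) 0 + t.getD k 0)) t0).length = t0.length :=
      pv_length_prefix t0 r
    rw [List.range_succ, List.foldl_append, List.foldl_cons, List.foldl_nil,
        pv_getD_set_eq _ _ _ (by rw [hlen]; exact hr r (by omega))]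
    by_cases h : j = 1 + r
    · rw [if_pos h, if_pos (by omega), ih hr' (1 + r), ih hr' r,
          if_neg (by omega), if_pos (le_refl r)]
      subst h
      have h2 : 1 + r = r + 1 := by omega
      rw [h2, pv_psum_succ]; ring
    · rw [if_neg h, ih hr' j]
      by_cases h2 : j ≤ r
      · rw [if_pos h2, if_pos (by omega)]
      · rw [if_neg h2, if_neg (by omega)]

-- ---- B side ----

-- a Python slice table[k:] under a legal wrapped index: head and tail of the list
theorem pv_slice_from (t : List Int) (s : Int) (h : PySem.Raise.InRange t.length s) :
    PySem.List.slice t (some s) none = t.drop (pvIdx t.length s) := by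
  obtain ⟨h1, h2⟩ := h
  by_cases hs : 0 ≤ s
  · have hx := PySem.List.slice_from_natCast t s.toNat
    rw [show ((s.toNat : Nat) : Int) = s from by omega] at hx
    rw [hx, pv_idx_nonneg _ _ hs (by omega)]
  · have hk : 0 < (-s).toNat := by omega
    have hx := PySem.List.slice_from_neg_natCast t (-s).toNat hk
    rw [show (-(((-s).toNat : Nat) : Int)) = s from by omega] at hx
    rw [hx, pv_idx_neg _ _ (by omega) h1]

theorem pv_slice_to (t : List Int) (s : Int) (h : PySem.Raise.InRange t.length s) :
    PySem.List.slice t none (some s) = t.take (pvIdx t.length s) := by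
  obtain ⟨h1, h2⟩ := h
  by_cases hs : 0 ≤ s
  · have hx := PySem.List.slice_to_natCast t s.toNat
    rw [show ((s.toNat : Nat) : Int) = s from by omega] at hx
    rw [hx, pv_idx_nonneg _ _ hs (by omega)]
  · have hk : 0 < (-s).toNat := by omega
    have hx := PySem.List.slice_to_neg_natCast t (-s).toNat hk
    rw [show (-(((-s).toNat : Nat) : Int)) = s from by omega] at hx
    rw [hx, pv_idx_neg _ _ (by omega) h1]

-- splicing a suffix through +a: length and entries
theorem pv_length_splice (t : List Int) (k : Nat) (f : Int → Int) :
    (t.take k ++ (t.drop k).map f).length = t.length := by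
  simp only [List.length_append, List.length_take, List.length_map, List.length_drop]
  omega

theorem pv_splice_getD (t : List Int) (k : Nat) (hk : k ≤ t.length) (a : Int) (j : Nat) :
    (t.take k ++ (t.drop k).map (fun x => x + a)).getD j 0
      = t.getD j 0 + if k ≤ j ∧ j < t.length then a else 0 := by
  rw [List.getD_eq_getElem?_getD, List.getD_eq_getElem?_getD]
  by_cases hj : j < k
  · rw [List.getElem?_append_left (by simp; omega), List.getElem?_take_of_lt hj,
        if_neg (by omega)]
    ring
  · by_cases hj2 : j < t.length
    · rw [List.getElem?_append_right (by simp; omega)]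
      have hlen : (t.take k).length = k := by simp; omega
      rw [hlen, List.getElem?_map, List.getElem?_drop]
      have he : k + (j - k) = j := by omega
      rw [he, List.getElem?_eq_getElem hj2]
      simp only [Option.map_some, Option.getD_some]
      rw [if_pos ⟨by omega, hj2⟩]
    · have h1 : (t.take k ++ (t.drop k).map (fun x => x + a))[j]? = none := by
        rw [List.getElem?_eq_none_iff]
        rw [pv_length_splice]
        omega
      have h2 : t[j]? = none := by
        rw [List.getElem?_eq_none_iff]
        omega
      rw [h1, h2, if_neg (by omega)]
      simp

-- B's step on one triple, as ported (two slice assignments)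
def pvStepB (t : List Int) (sea : Int × Int × Int) : List Int :=
  let t1 := PySem.List.slice t none (some sea.1) ++
    (PySem.List.slice t (some sea.1) none).map (fun x => x + sea.2.2)
  PySem.List.slice t1 none (some sea.2.1) ++
    (PySem.List.slice t1 (some sea.2.1) none).map (fun x => x - sea.2.2)

theorem pv_splice_sub (t : List Int) (k : Nat) (a : Int) :
    t.take k ++ (t.drop k).map (fun x => x - a) = t.take k ++ (t.drop k).map (fun x => x + (-a)) := by
  simp only [sub_eq_add_neg]

theorem pv_stepB_getD (t : List Int) (sea : Int × Int × Int)
    (h1 : PySem.Raise.InRange t.length sea.1) (h2 : PySem.Raise.InRange t.length sea.2.1)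
    (j : Nat) :
    (pvStepB t sea).getD j 0 =
      t.getD j 0 + ((if pvIdx t.length sea.1 ≤ j ∧ j < t.length then sea.2.2 else 0)
                    - (if pvIdx t.length sea.2.1 ≤ j ∧ j < t.length then sea.2.2 else 0)) := by
  have hk1 : pvIdx t.length sea.1 < t.length :=
    pv_pyIdx_some_lt _ _ _ (pv_inRange_idx _ _ h1)
  have hk2 : pvIdx t.length sea.2.1 < t.length :=
    pv_pyIdx_some_lt _ _ _ (pv_inRange_idx _ _ h2)
  unfold pvStepB
  simp only
  rw [pv_slice_from t sea.1 h1, pv_slice_to t sea.1 h1]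
  set t1 := t.take (pvIdx t.length sea.1) ++
    (t.drop (pvIdx t.length sea.1)).map (fun x => x + sea.2.2) with ht1
  have hlen1 : t1.length = t.length := by rw [ht1, pv_length_splice]
  have h2' : PySem.Raise.InRange t1.length sea.2.1 := by rw [hlen1]; exact h2
  have hidx2 : pvIdx t1.length sea.2.1 = pvIdx t.length sea.2.1 := by rw [hlen1]
  rw [pv_slice_from t1 sea.2.1 h2', pv_slice_to t1 sea.2.1 h2', hidx2, pv_splice_sub,
      pv_splice_getD t1 _ (by omega) (-sea.2.2) j, hlen1,
      ht1, pv_splice_getD t _ (by omega) sea.2.2 j]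
  split_ifs <;> ring

theorem pv_length_stepB (t : List Int) (sea : Int × Int × Int)
    (h1 : PySem.Raise.InRange t.length sea.1) (h2 : PySem.Raise.InRange t.length sea.2.1) :
    (pvStepB t sea).length = t.length := by
  unfold pvStepB
  simp only
  rw [pv_slice_from t sea.1 h1, pv_slice_to t sea.1 h1]
  set t1 := t.take (pvIdx t.length sea.1) ++
    (t.drop (pvIdx t.length sea.1)).map (fun x => x + sea.2.2) with ht1
  have hlen1 : t1.length = t.length := by rw [ht1, pv_length_splice]
  have h2' : PySem.Raise.InRange t1.length sea.2.1 := by rw [hlen1]; exact h2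
  rw [pv_slice_from t1 sea.2.1 h2', pv_slice_to t1 sea.2.1 h2', pv_length_splice, hlen1]

theorem pv_fillB_getD (L : List (Int × Int × Int)) (t : List Int)
    (hL : ∀ sea ∈ L, PySem.Raise.InRange t.length sea.1 ∧ PySem.Raise.InRange t.length sea.2.1)
    (j : Nat) :
    (L.foldl pvStepB t).getD j 0 =
      t.getD j 0 + (L.map (fun sea =>
        (if pvIdx t.length sea.1 ≤ j ∧ j < t.length then sea.2.2 else 0)
        - (if pvIdx t.length sea.2.1 ≤ j ∧ j < t.length then sea.2.2 else 0))).sum := by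
  induction L generalizing t with
  | nil => simp
  | cons sea L ih =>
    have hsea := hL sea (by simp)
    have htail : ∀ x ∈ L, PySem.Raise.InRange (pvStepB t sea).length x.1 ∧
        PySem.Raise.InRange (pvStepB t sea).length x.2.1 := by
      intro x hx
      have h := hL x (List.mem_cons_of_mem _ hx)
      rw [pv_length_stepB t sea hsea.1 hsea.2]
      exact h
    rw [List.foldl_cons, ih _ htail, pv_stepB_getD t sea hsea.1 hsea.2 j]
    simp only [List.map_cons, List.sum_cons, pv_length_stepB t sea hsea.1 hsea.2]
    ring

theorem pv_length_fillB (L : List (Int × Int × Int)) (t : List Int)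
    (hL : ∀ sea ∈ L, PySem.Raise.InRange t.length sea.1 ∧ PySem.Raise.InRange t.length sea.2.1) :
    (L.foldl pvStepB t).length = t.length := by
  induction L generalizing t with
  | nil => rfl
  | cons sea L ih =>
    have hsea := hL sea (by simp)
    have hstep := pv_length_stepB t sea hsea.1 hsea.2
    rw [List.foldl_cons, ih _ (by intro x hx; rw [hstep]; exact hL x (List.mem_cons_of_mem _ hx)), hstep]

-- ---- bridging A's index loop to the zipped triples ----

theorem pv_rangeA_eq_zip (start end_ add : List Int) (n : Nat)
    (h1 : n ≤ start.length) (h2 : n ≤ end_.length) (h3 : n ≤ add.length) (t : List Int) :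
    (List.range n).foldl (fun (t : List Int) (i : Nat) =>
      let t1 := PySem.List.pySetD t (PySem.List.pyGetD start (i : Int) 0)
        (PySem.List.pyGetD t (PySem.List.pyGetD start (i : Int) 0) 0 + PySem.List.pyGetD add (i : Int) 0)
      PySem.List.pySetD t1 (PySem.List.pyGetD end_ (i : Int) 0)
        (PySem.List.pyGetD t1 (PySem.List.pyGetD end_ (i : Int) 0) 0 - PySem.List.pyGetD add (i : Int) 0)) t
      = ((start.zip (end_.zip add)).take n).foldl pvStepA t := by
  induction n generalizing t with
  | zero => rfl
  | succ n ih =>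
    rw [List.range_succ, List.foldl_append, ih (by omega) (by omega) (by omega),
        List.take_add_one]
    have hz : (start.zip (end_.zip add))[n]? =
        some (start[n]'(by omega), end_[n]'(by omega), add[n]'(by omega)) := by
      rw [List.getElem?_eq_getElem (by simp; omega)]
      simp [List.getElem_zip]
    rw [hz, Option.toList_some, List.foldl_append, List.foldl_cons, List.foldl_nil,
        List.foldl_cons, List.foldl_nil]
    simp only [PySem.List.pyGetD_natCast]
    rw [List.getD_eq_getElem start 0 (by omega), List.getD_eq_getElem end_ 0 (by omega),
        List.getD_eq_getElem add 0 (by omega)]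
    rfl

-- getD of a replicate-0 table is 0 everywhere
theorem pv_getD_repl (N : Nat) (k : Nat) : (List.replicate N (0 : Int)).getD k 0 = 0 := by
  rw [List.getD_eq_getElem?_getD]
  by_cases h : k < N
  · simp [h]
  · simp [h]

theorem pv_psum_repl (N : Nat) (j : Nat) : pvPsum (List.replicate N (0 : Int)) j = 0 := by
  unfold pvPsum
  simp

-- the prefix range of A's second loop, in Nat form
theorem pv_pyRange_prefix (m : Int) :
    PySem.List.pyRange 1 (m + 2) 1 = (List.range ((m + 2).toNat - 1)).map (fun k => ((1 + k : Nat) : Int)) := by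
  rw [PySem.List.pyRange_one]
  have h : (m + 2 - 1).toNat = (m + 2).toNat - 1 := by omega
  rw [h]
  apply List.map_congr_left
  intro k _
  push_cast; ring

-- ===== VERDICT (by name: the statement is the Claim_ definition above) =====
theorem imos1_spec : Claim_equal_imos1 := by
  unfold Claim_equal_imos1
  intro start end_ add _ hPre
  unfold Spec_imos1
  obtain ⟨hne, hlen1, hlen2, hidx⟩ := hPre
  obtain ⟨m, hm⟩ : ∃ m, PySem.List.max? end_ (fun x => x) = some m := by
    cases h : PySem.List.max? end_ (fun x => x) with
    | none => exact absurd ((PySem.List.max?_eq_none_iff end_ (fun x => x)).mp h) hne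
    | some m => exact ⟨m, rfl⟩
  rw [hm] at hidx
  simp only [Option.getD_some] at hidx
  unfold imos1 imos1_alt
  rw [hm]
  simp only [PySem.List.pyRepeat_singleton]
  rw [pv_rangeA_eq_zip start end_ add start.length (le_refl _) hlen1 hlen2]
  set N := (m + 2).toNat with hN
  set L := start.zip (end_.zip add) with hLdef
  set t0 := List.replicate N (0 : Int) with ht0
  have ht0len : t0.length = N := by simp [ht0]
  have hLlen : L.length = start.length := by
    simp [hLdef]; omega
  have htake : L.take start.length = L := List.take_of_length_le (by omega)
  rw [htake]
  -- every triple in L has legal Python indices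
  have hGood : ∀ sea ∈ L, PySem.Raise.InRange t0.length sea.1 ∧
      PySem.Raise.InRange t0.length sea.2.1 := by
    intro sea hsea
    obtain ⟨i, hi, hget⟩ := List.mem_iff_getElem.mp hsea
    have hi' : i < start.length := by rwa [hLlen] at hi
    simp only [hLdef, List.getElem_zip] at hget
    have h1 := hidx i hi'
    rw [List.getD_eq_getElem start 0 hi', List.getD_eq_getElem end_ 0 (by omega)] at h1
    rw [← hget, ht0len]
    exact h1
  -- identify the B-side fold
  show (PySem.List.pyRange 1 (m + 2) 1).foldl (fun t i =>
      PySem.List.pySetD t i (PySem.List.pyGetD t i 0 + PySem.List.pyGetD t (i - 1) 0))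
      (L.foldl pvStepA t0) = L.foldl pvStepB t0
  have hdifflen : (L.foldl pvStepA t0).length = N := by rw [pv_length_fillA, ht0len]
  have hBlen : (L.foldl pvStepB t0).length = N := by rw [pv_length_fillB L t0 hGood, ht0len]
  -- rewrite the prefix loop into set/getD Nat form
  have hprefix : (PySem.List.pyRange 1 (m + 2) 1).foldl (fun t i =>
      PySem.List.pySetD t i (PySem.List.pyGetD t i 0 + PySem.List.pyGetD t (i - 1) 0))
      (L.foldl pvStepA t0)
      = (List.range (N - 1)).foldl (fun t k => t.set (1 + k) (t.getD (1 + k) 0 + t.getD k 0))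
          (L.foldl pvStepA t0) := by
    rw [pv_pyRange_prefix, List.foldl_map, ← hN]
    apply PySem.List.foldl_congr_mem
    intro t' k _
    have h1 : (((1 + k : Nat) : Int) - 1) = ((k : Nat) : Int) := by push_cast; ring
    rw [h1, PySem.List.pySetD_natCast, PySem.List.pyGetD_natCast, PySem.List.pyGetD_natCast]
  rw [hprefix]
  have hAlen : ((List.range (N - 1)).foldl (fun t k => t.set (1 + k) (t.getD (1 + k) 0 + t.getD k 0))
      (L.foldl pvStepA t0)).length = N := by rw [pv_length_prefix, hdifflen]
  apply List.ext_getElem (by rw [hAlen, hBlen])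
  intro j hj1 hj2
  have hjN : j < N := by rwa [hAlen] at hj1
  rw [← List.getD_eq_getElem _ 0 hj1, ← List.getD_eq_getElem _ 0 hj2,
      pv_prefix_getD _ (N - 1) (by intro k hk; rw [hdifflen]; omega) j,
      if_pos (by omega),
      pv_psum_fillA L t0 hGood j,
      pv_fillB_getD L t0 hGood j,
      show pvPsum t0 j = 0 from by rw [ht0]; exact pv_psum_repl N j,
      show t0.getD j 0 = 0 from by rw [ht0]; exact pv_getD_repl N j,
      zero_add, zero_add]
  apply congrArg List.sum
  apply List.map_congr_left
  intro sea hsea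
  have hjlen : j < t0.length := by rw [ht0len]; exact hjN
  by_cases h1 : pvIdx t0.length sea.1 ≤ j
  · by_cases h2 : pvIdx t0.length sea.2.1 ≤ j
    · rw [if_pos h1, if_pos h2, if_pos ⟨h1, hjlen⟩, if_pos ⟨h2, hjlen⟩]
    · rw [if_pos h1, if_neg h2, if_pos ⟨h1, hjlen⟩, if_neg (by omega)]
  · by_cases h2 : pvIdx t0.length sea.2.1 ≤ j
    · rw [if_neg h1, if_pos h2, if_neg (by omega), if_pos ⟨h2, hjlen⟩]
    · rw [if_neg h1, if_neg h2, if_neg (by omega), if_neg (by omega)]
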